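-- pv_equiv track=rewrite | github.com/jxwleong/xut-cli | system_info.py | get_system_information_list
-- ===== SOURCE A (Python) =====
-- def split_key_value(list_):
--     """
--     Reference: https://www.tutorialspoint.com/python-program-to-split-the-even-and-odd-elements-into-two-different-lists
--     Return two list where the element with index 0, 2, 4, ... => key and 1, 3, 5, ... => value
--
--     Args:
--         list_ (list): List where the element will be splitted into key and value list.
--
--     Returns:
--         key (list): List with element where the index of the element is 0 when modulo with 2
--                     (Remainder = 0 when divide by 2).
--         value (list): List with elements with index that are not divisible by two.
--
--     Example:
--         list_ = ["Brand String", "Intel(R) Core(TM) i7-6700HQ CPU @ 2.60GHz",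
--                  "Family", "Skylake"]
--         key = ["Brand String", "Family"]
--         value = ["Intel(R) Core(TM) i7-6700HQ CPU @ 2.60GHz", "Skylake"]
--     """
--     key = []
--     value = []
--     for index, element in enumerate(list_):
--         if (index % 2 == 0):
--             key.append(element)
--         else:
--             value.append(element)
--     return key, value
--
-- def get_system_information_list(list_: list, start: str, end: str=None) -> list:
--     """
--     Extract system information from system info list extract from XTU System Info Pane,
--     and convert them into a key,value pair in a list with tuple element (zip).
--
--     Args:
--         list_ (list): System information extracted to XUT UI.
--         start (str): Start element to iteration.
--         end (str): End element for the iteration.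
--
--     Returns:
--         list_ (list): Updated version of the argument (list_), iterated element is removed.
--         device_list (list): Device information in list with key, value pair. Determined by the
--                             "start" and "end"
--     """
--     device = []
--     for element in (list_[:]):  # [:] means return the shallow copy of the new list, https://docs.python.org/3/tutorial/introduction.html#strings
--         if element == start:
--             list_.remove(element)
--         elif element  != end:
--             device.append(element)
--             list_.remove(element)
--         elif element == end:
--             break
--         else:   # If end is None
--             continue
--     key, value = split_key_value(device)
--     device_list = list(zip(key, value))
--     return list_, device_list
-- ===== SOURCE B (Python) =====
-- def get_system_information_list(list_, start, end=None):
--     # Equivalence is about the return value; like A, this mutates list_ in place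
--     # (A deletes the consumed prefix one remove() at a time; B reassigns the suffix).
--     cut = len(list_)
--     for i, e in enumerate(list_):
--         if e == end and e != start:
--             cut = i
--             break
--     device = [e for e in list_[:cut] if e != start]
--     list_[:] = list_[cut:]
--     return list_, list(zip(device[::2], device[1::2]))
-- ===== Notes on version B (the rewrite author's own statement) =====
-- stated objective: faster
-- what changed: Instead of scanning a copy and deleting each consumed element with list.remove (an O(n) scan per element), B finds the first real end marker, filters the prefix in one pass, keeps the suffix by slicing, and pairs keys/values by stride slices.
import Mathlib
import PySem

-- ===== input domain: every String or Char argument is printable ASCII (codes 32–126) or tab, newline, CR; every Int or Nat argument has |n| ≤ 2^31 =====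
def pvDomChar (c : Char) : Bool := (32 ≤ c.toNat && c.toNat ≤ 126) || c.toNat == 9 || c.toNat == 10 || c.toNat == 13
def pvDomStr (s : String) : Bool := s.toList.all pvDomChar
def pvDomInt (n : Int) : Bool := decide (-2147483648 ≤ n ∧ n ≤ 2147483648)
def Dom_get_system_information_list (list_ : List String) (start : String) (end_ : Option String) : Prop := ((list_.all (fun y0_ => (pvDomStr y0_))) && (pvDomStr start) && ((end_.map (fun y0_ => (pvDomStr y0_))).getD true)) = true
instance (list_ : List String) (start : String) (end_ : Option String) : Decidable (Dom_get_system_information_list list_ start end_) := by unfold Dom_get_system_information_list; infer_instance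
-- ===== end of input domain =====

-- B replaces A's copy-scan-and-remove loop (O(n) remove per element) by one cut index,
-- a slice and a filter, and pairs keys/values by stride slices: O(n) instead of O(n^2).
-- Return-value equivalence; both Pythons mutate list_ in place to the same final contents.

-- ===== PORT A =====
-- split_key_value: enumerate with parity test, two accumulator lists
def split_key_value (list_ : List String) : List String × List String :=
  (PySem.List.enumerate list_).foldl
    (fun kv p => if p.1 % 2 == 0 then (kv.1 ++ [p.2], kv.2) else (kv.1, kv.2 ++ [p.2]))
    ([], [])

-- the for-loop over list_[:] with list_.remove(element); Python's remove never fails here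
-- (the element just read is still the first occurrence of its value), so the none case of
-- remove? is unreachable and getD keeps the list unchanged there.
def gsilLoop (copy : List String) (list_ : List String) (device : List String)
    (start : String) (end_ : Option String) : List String × List String :=
  match copy with
  | [] => (list_, device)
  | e :: rest =>
    if e == start then
      gsilLoop rest ((PySem.List.remove? list_ e).getD list_) device start end_
    else if !(some e == end_) then
      gsilLoop rest ((PySem.List.remove? list_ e).getD list_) (device ++ [e]) start end_
    else
      (list_, device)   -- element == end: break

def get_system_information_list (list_ : List String) (start : String) (end_ : Option String) : List String × (List (String × String)) :=
  let r := gsilLoop list_ list_ [] start end_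
  let kv := split_key_value r.2
  (r.1, List.zip kv.1 kv.2)

-- ===== PORT B =====
-- index of the first element equal to end (and ≠ start); list length if none — the loop in Source B
def gsilCut (l : List String) (start : String) (end_ : Option String) : Nat :=
  match l with
  | [] => 0
  | e :: rest => if some e == end_ && !(e == start) then 0 else 1 + gsilCut rest start end_

-- xs[::2] (exact for a step-2 slice of the whole list)
def stride2 (l : List String) : List String :=
  match l with
  | [] => []
  | [x] => [x]
  | x :: _ :: rest => x :: stride2 rest

def get_system_information_list_alt (list_ : List String) (start : String) (end_ : Option String) : List String × (List (String × String)) :=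
  let cut := gsilCut list_ start end_
  let device := (list_.take cut).filter (fun e => !(e == start))  -- list_[:cut] filtered
  (list_.drop cut, List.zip (stride2 device) (stride2 device.tail))  -- list_[cut:], device[::2], device[1::2]

-- ===== PRECONDITION & SPEC =====
def Spec_get_system_information_list (list_ : List String) (start : String) (end_ : Option String) (out : List String × (List (String × String))) : Prop := out = get_system_information_list_alt list_ start end_
instance (list_ : List String) (start : String) (end_ : Option String) (out : List String × (List (String × String))) : Decidable (Spec_get_system_information_list list_ start end_ out) := by unfold Spec_get_system_information_list; infer_instance

-- ===== CLAIM (what is proved, stated in full; the proofs are below) =====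
def Claim_equal_get_system_information_list : Prop := ∀ (list_ : List String) (start : String) (end_ : Option String), Dom_get_system_information_list list_ start end_ → Spec_get_system_information_list list_ start end_ (get_system_information_list list_ start end_)

-- ===== LEMMAS AND PROOFS =====

lemma stride2_cons (e : String) (rest : List String) :
    stride2 (e :: rest) = e :: stride2 rest.tail := by
  cases rest <;> simp [stride2]

-- the loop, run with copy = current list, consumes exactly the prefix up to the cut
lemma gsilLoop_eq (start : String) (end_ : Option String) :
    ∀ (l d : List String),
      gsilLoop l l d start end_ =
        (l.drop (gsilCut l start end_),
         d ++ (l.take (gsilCut l start end_)).filter (fun e => !(e == start))) := by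
  intro l
  induction l with
  | nil => intro d; simp [gsilLoop, gsilCut]
  | cons e rest ih =>
    intro d
    by_cases hs : (e == start) = true
    · have hc : ¬ (some e == end_ && !(e == start)) = true := by simp [hs]
      rw [gsilLoop, if_pos hs, PySem.List.remove?_cons_self, Option.getD_some, ih d,
        gsilCut, if_neg hc, Nat.add_comm, List.drop_succ_cons, List.take_succ_cons,
        List.filter_cons_of_neg]
      simp [hs]
    · by_cases he : (some e == end_) = true
      · have hc : (some e == end_ && !(e == start)) = true := by simp [hs, he]
        rw [gsilLoop, if_neg hs, gsilCut, if_pos hc]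
        simp [he]
      · have hc : ¬ (some e == end_ && !(e == start)) = true := by simp [he]
        have hb : (!(some e == end_)) = true := by simp [he]
        rw [gsilLoop, if_neg hs, if_pos hb, PySem.List.remove?_cons_self, Option.getD_some,
          ih (d ++ [e]), gsilCut, if_neg hc, Nat.add_comm, List.drop_succ_cons,
          List.take_succ_cons, List.filter_cons_of_pos]
        · simp
        · simp [hs]

-- split_key_value splits into the even- and odd-index stride slices
lemma skv_aux (l : List String) : ∀ (s : Int) (k v : List String),
    (PySem.List.enumerate l s).foldl
      (fun kv p => if p.1 % 2 == 0 then (kv.1 ++ [p.2], kv.2) else (kv.1, kv.2 ++ [p.2]))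
      (k, v) =
    (if s % 2 == 0 then (k ++ stride2 l, v ++ stride2 l.tail)
     else (k ++ stride2 l.tail, v ++ stride2 l)) := by
  induction l with
  | nil => intro s k v; split <;> simp [PySem.List.enumerate, stride2]
  | cons e rest ih =>
    intro s k v
    rw [PySem.List.enumerate_cons, List.foldl_cons]
    by_cases hs : (s % 2 == 0) = true
    · have hred : (if (s, e).1 % 2 == 0 then ((k, v).1 ++ [(s, e).2], (k, v).2)
          else ((k, v).1, (k, v).2 ++ [(s, e).2])) = (k ++ [e], v) := by simp [hs]
      have hs1 : ¬ ((s + 1) % 2 == 0) = true := by simp at hs ⊢; omega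
      rw [hred, ih (s + 1) (k ++ [e]) v, if_neg hs1, if_pos hs, stride2_cons]
      simp
    · have hred : (if (s, e).1 % 2 == 0 then ((k, v).1 ++ [(s, e).2], (k, v).2)
          else ((k, v).1, (k, v).2 ++ [(s, e).2])) = (k, v ++ [e]) := by simp [hs]
      have hs1 : ((s + 1) % 2 == 0) = true := by simp at hs ⊢; omega
      rw [hred, ih (s + 1) k (v ++ [e]), if_pos hs1, if_neg hs, stride2_cons]
      simp

lemma split_key_value_eq (l : List String) :
    split_key_value l = (stride2 l, stride2 l.tail) := by
  have := skv_aux l 0 [] []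
  simpa [split_key_value, PySem.List.enumerate] using this

-- ===== VERDICT (by name: the statement is the Claim_ definition above) =====
theorem get_system_information_list_spec : Claim_equal_get_system_information_list := by
  intro list_ start end_ _
  show get_system_information_list list_ start end_ = get_system_information_list_alt list_ start end_
  simp only [get_system_information_list, get_system_information_list_alt,
    gsilLoop_eq, split_key_value_eq, List.nil_append]
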